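-- pv_equiv track=rewrite | github.com/rfwwp8k542-maker/Norscode-language | projects/language/main.py | tokenize_simple
-- ===== SOURCE A (Python) =====
-- def tokenize_simple(text: str) -> list[str]:
--     tokens: list[str] = []
--     current: list[str] = []
--     in_comment = False
--
--     for ch in text:
--         if in_comment:
--             if ch == "\n":
--                 in_comment = False
--             continue
--
--         if ch == "#":
--             if current:
--                 tokens.append("".join(current))
--                 current.clear()
--             in_comment = True
--             continue
--
--         if ch.isalnum() or ch in "_-":
--             current.append(ch)
--             continue
--
--         if current:
--             tokens.append("".join(current))
--             current.clear()
--
--     if current: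
--         tokens.append("".join(current))
--
--     return tokens
-- ===== SOURCE B (Python) =====
-- def tokenize_simple(text: str) -> list[str]:
--     tokens: list[str] = []
--     for line in text.split('\n'):
--         seg = line.split('#', 1)[0]
--         buf: list[str] = []
--         for ch in seg:
--             if ch.isalnum() or ch in "_-":
--                 buf.append(ch)
--             elif buf:
--                 tokens.append(''.join(buf))
--                 buf.clear()
--         if buf:
--             tokens.append(''.join(buf))
--     return tokens
-- ===== Notes on version B (the rewrite author's own statement) =====
-- stated objective: simpler
-- what changed: Replaces A's character-level state machine with an in_comment flag by a per-line decomposition: split the text on newlines, cut each line at its first hash character, and collect maximal runs of word characters per line.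
import Mathlib
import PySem

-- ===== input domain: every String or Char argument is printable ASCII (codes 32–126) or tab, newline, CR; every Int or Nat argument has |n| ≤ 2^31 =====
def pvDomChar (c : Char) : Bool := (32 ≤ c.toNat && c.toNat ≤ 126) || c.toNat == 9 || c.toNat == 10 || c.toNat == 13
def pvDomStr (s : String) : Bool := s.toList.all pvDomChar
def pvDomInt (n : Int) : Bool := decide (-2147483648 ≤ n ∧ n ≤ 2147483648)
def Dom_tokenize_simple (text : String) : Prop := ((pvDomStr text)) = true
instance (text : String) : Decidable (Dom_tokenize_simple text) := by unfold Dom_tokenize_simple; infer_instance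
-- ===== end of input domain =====

-- B replaces A's character-level in_comment state machine by a per-line decomposition
-- (split on '\n', cut at '#', accumulate word runs); objective: simpler (same O(n) cost).

-- shared helpers: the literal test `ch.isalnum() or ch in "_-"` and the
-- `if current: tokens.append("".join(current)); current.clear()` flush idiom,
-- which appear verbatim in both Python versions ("".join over single chars = String.ofList)
def pvIsWord (c : Char) : Bool := PySem.Chars.isalnum c || c == '_' || c == '-'

def pvFlush (toks : List String) (cur : List Char) : List String :=
  if cur.isEmpty then toks else toks ++ [String.ofList cur]

-- ===== PORT A =====
def pvStepA (s : List String × List Char × Bool) (c : Char) :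
    List String × List Char × Bool :=
  if s.2.2 then
    (if c == '\n' then (s.1, s.2.1, false) else s)
  else if c == '#' then (pvFlush s.1 s.2.1, [], true)
  else if pvIsWord c then (s.1, s.2.1 ++ [c], false)
  else (pvFlush s.1 s.2.1, [], false)

def tokenize_simple (text : String) : List String :=
  let s := text.toList.foldl pvStepA ([], [], false)
  pvFlush s.1 s.2.1

-- ===== PORT B =====
-- exact port of text.split('\n') for the single-character separator '\n'
def pvSplitNL : List Char → List (List Char)
  | [] => [[]]
  | c :: cs =>
    match pvSplitNL cs with
    | [] => [[c]]
    | h :: t => if c == '\n' then [] :: h :: t else (c :: h) :: t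

def pvStepB (s : List String × List Char) (c : Char) : List String × List Char :=
  if pvIsWord c then (s.1, s.2 ++ [c])
  else (pvFlush s.1 s.2, [])

def pvLineToks (toks : List String) (line : List Char) : List String :=
  -- line.split('#', 1)[0] is the prefix of the line before its first '#'
  let seg := line.takeWhile (fun c => !(c == '#'))
  let s := seg.foldl pvStepB (toks, [])
  pvFlush s.1 s.2

def tokenize_simple_alt (text : String) : List String :=
  (pvSplitNL text.toList).foldl pvLineToks []

-- ===== PRECONDITION & SPEC =====
def Spec_tokenize_simple (text : String) (out : List String) : Prop := out = tokenize_simple_alt text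
instance (text : String) (out : List String) : Decidable (Spec_tokenize_simple text out) := by unfold Spec_tokenize_simple; infer_instance

-- ===== CLAIM (what is proved, stated in full; the proofs are below) =====
def Claim_equal_tokenize_simple : Prop := ∀ (text : String), Dom_tokenize_simple text → Spec_tokenize_simple text (tokenize_simple text)

-- ===== LEMMAS AND PROOFS =====

-- the rest of the input after skipping past the first '\n' (inclusive)
def pvSkip (cs : List Char) : List Char :=
  (cs.dropWhile (fun c => !(c == '\n'))).drop 1

lemma pvSkip_length_le (cs : List Char) : (pvSkip cs).length ≤ cs.length := by
  have h1 := List.length_dropWhile_le (p := fun c => !(c == '\n')) (l := cs)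
  simp only [pvSkip, List.length_drop]
  omega

lemma pvSkip_newline_cons (cs : List Char) : pvSkip ('\n' :: cs) = cs := by
  simp [pvSkip]

lemma pvSkip_cons_of_ne (c : Char) (cs : List Char) (hc : ¬ c = '\n') :
    pvSkip (c :: cs) = pvSkip cs := by
  simp [pvSkip, hc]

-- common recursive description of both tokenizers
def pvF (cs : List Char) (t : List String) (b : List Char) : List String :=
  match cs with
  | [] => pvFlush t b
  | c :: cs' =>
    if c = '#' then pvF (pvSkip cs') (pvFlush t b) []
    else if pvIsWord c then pvF cs' t (b ++ [c])
    else pvF cs' (pvFlush t b) []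
termination_by cs.length
decreasing_by
  · have := pvSkip_length_le cs'; simp; omega
  · simp
  · simp

def pvFinish (s : List String × List Char × Bool) : List String := pvFlush s.1 s.2.1

-- A in comment mode = skip to just past the next newline
lemma pvA_comment (cs : List Char) (t : List String) (b : List Char) :
    pvFinish (cs.foldl pvStepA (t, b, true)) =
      pvFinish ((pvSkip cs).foldl pvStepA (t, b, false)) := by
  induction cs generalizing t b with
  | nil => simp [pvSkip, pvFinish]
  | cons c cs ih =>
    by_cases hc : c = '\n'
    · subst hc
      rw [pvSkip_newline_cons]
      simp [pvStepA]
    · rw [pvSkip_cons_of_ne c cs hc]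
      have hstep : pvStepA (t, b, true) c = (t, b, true) := by
        simp [pvStepA, hc]
      simpa [hstep] using ih t b

-- A equals the common recursion
lemma pvA_eq_pvF (cs : List Char) (t : List String) (b : List Char) :
    pvFinish (cs.foldl pvStepA (t, b, false)) = pvF cs t b := by
  induction cs, t, b using pvF.induct with
  | case1 t b => simp [pvF, pvFinish]
  | case2 t b cs' ih =>
    have hstep : pvStepA (t, b, false) '#' = (pvFlush t b, [], true) := by
      simp [pvStepA]
    rw [pvF]
    simp only [List.foldl_cons, hstep]
    rw [pvA_comment]
    simp only [if_pos]
    exact ih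
  | case3 t b c cs' hc hw ih =>
    have hstep : pvStepA (t, b, false) c = (t, b ++ [c], false) := by
      simp [pvStepA, hc, hw]
    rw [pvF]
    simp only [List.foldl_cons, hstep, if_neg hc, if_pos hw]
    exact ih
  | case4 t b c cs' hc hw ih =>
    have hstep : pvStepA (t, b, false) c = (pvFlush t b, [], false) := by
      simp [pvStepA, hc, hw]
    rw [pvF]
    simp only [List.foldl_cons, hstep, if_neg hc, hw, if_neg, Bool.not_eq_true]
    exact ih

-- pvSplitNL always yields at least one piece
lemma pvSplitNL_ne_nil (cs : List Char) : pvSplitNL cs ≠ [] := by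
  cases cs with
  | nil => simp [pvSplitNL]
  | cons c cs =>
    rcases h : pvSplitNL cs with _ | ⟨a, b⟩
    · rw [pvSplitNL, h]; simp
    · rw [pvSplitNL, h]; by_cases hc : (c == '\n') = true <;> simp [hc]

-- pvSplitNL unfolds one line at a time
lemma pvSplitNL_eq (cs : List Char) :
    pvSplitNL cs = cs.takeWhile (fun c => !(c == '\n')) ::
      (if '\n' ∈ cs then pvSplitNL (pvSkip cs) else []) := by
  induction cs with
  | nil => simp [pvSplitNL]
  | cons c cs ih =>
    rcases h : pvSplitNL cs with _ | ⟨w, tl⟩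
    · exact absurd h (pvSplitNL_ne_nil cs)
    · rw [h] at ih
      injection ih with hw htl
      by_cases hc : c = '\n'
      · subst hc
        rw [pvSplitNL, h]
        simp [pvSkip_newline_cons, h, hw, htl]
      · have hcb : (c == '\n') = false := by simp [hc]
        have hc' : ¬ '\n' = c := fun h' => hc h'.symm
        rw [pvSplitNL, h]
        simp [hcb, pvSkip_cons_of_ne c cs hc, hw, htl, hc']

lemma pvSkip_of_not_mem (cs : List Char) (h : '\n' ∉ cs) : pvSkip cs = [] := by
  have hd : cs.dropWhile (fun c => !(c == '\n')) = [] := by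
    rw [List.dropWhile_eq_nil_iff]
    intro x hx
    simp only [Bool.not_eq_eq_eq_not, Bool.not_true, beq_eq_false_iff_ne, ne_eq]
    exact fun h' => h (h' ▸ hx)
  simp [pvSkip, hd]

-- B's line fold, generalized to a nonempty starting buffer for the first line
def pvLineToksFrom (toks : List String) (b : List Char) (line : List Char) : List String :=
  let s := (line.takeWhile (fun c => !(c == '#'))).foldl pvStepB (toks, b)
  pvFlush s.1 s.2

def pvLinesB (t : List String) (b : List Char) : List (List Char) → List String
  | [] => t
  | l :: ls => pvLinesB (pvLineToksFrom t b l) [] ls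

lemma pvLinesB_eq_foldl (ls : List (List Char)) (t : List String) :
    pvLinesB t [] ls = ls.foldl pvLineToks t := by
  induction ls generalizing t with
  | nil => rfl
  | cons l ls ih => simp [pvLinesB, ih, pvLineToksFrom, pvLineToks]

lemma pvLineToksFrom_nil (t : List String) (b : List Char) :
    pvLineToksFrom t b [] = pvFlush t b := by
  simp [pvLineToksFrom]

-- the common recursion equals B's per-line processing
lemma pvF_eq_pvLinesB (cs : List Char) (t : List String) (b : List Char) :
    pvF cs t b = pvLinesB t b (pvSplitNL cs) := by
  induction cs, t, b using pvF.induct with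
  | case1 t b =>
    simp [pvF, pvSplitNL, pvLinesB, pvLineToksFrom_nil]
  | case2 t b cs' ih =>
    have hskip : pvSkip ('#' :: cs') = pvSkip cs' := pvSkip_cons_of_ne _ _ (by decide)
    have hfrom : ∀ l, pvLineToksFrom t b ('#' :: l) = pvFlush t b := by
      intro l; simp [pvLineToksFrom]
    have htk : ('#' :: cs').takeWhile (fun c => !(c == '\n')) =
        '#' :: cs'.takeWhile (fun c => !(c == '\n')) := by simp
    have hpf : pvF ('#' :: cs') t b = pvF (pvSkip cs') (pvFlush t b) [] := by
      rw [pvF]; simp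
    rw [hpf, pvSplitNL_eq ('#' :: cs'), htk, hskip]
    simp only [List.mem_cons]
    by_cases hm : '\n' ∈ cs'
    · rw [if_pos (Or.inr hm)]
      simp only [pvLinesB]
      rw [hfrom]
      exact ih
    · rw [if_neg (by simp [hm]), pvSkip_of_not_mem cs' hm]
      simp only [pvLinesB]
      rw [hfrom]
      simp [pvF, pvFlush]
  | case3 t b c cs' hc hw ih =>
    have hcn : (c == '\n') = false := by
      rcases eq_or_ne c '\n' with h | h
      · subst h; exact absurd hw (by decide)
      · simp [h]
    have hcb : (c == '#') = false := by simp [hc]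
    rcases hsp : pvSplitNL cs' with _ | ⟨w, tl⟩
    · exact absurd hsp (pvSplitNL_ne_nil cs')
    · have hlt : pvLineToksFrom t b (c :: w) = pvLineToksFrom t (b ++ [c]) w := by
        simp [pvLineToksFrom, hcb, pvStepB, hw]
      calc pvF (c :: cs') t b
          = pvF cs' t (b ++ [c]) := by rw [pvF]; simp [hc, hw]
        _ = pvLinesB t (b ++ [c]) (pvSplitNL cs') := ih
        _ = pvLinesB (pvLineToksFrom t (b ++ [c]) w) [] tl := by
            rw [hsp]; simp only [pvLinesB]
        _ = pvLinesB (pvLineToksFrom t b (c :: w)) [] tl := by rw [hlt]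
        _ = pvLinesB t b ((c :: w) :: tl) := by simp only [pvLinesB]
        _ = pvLinesB t b (pvSplitNL (c :: cs')) := by
            rw [pvSplitNL, hsp]; simp [hcn]
  | case4 t b c cs' hc hw ih =>
    rcases hsp : pvSplitNL cs' with _ | ⟨w, tl⟩
    · exact absurd hsp (pvSplitNL_ne_nil cs')
    · by_cases hcn : c = '\n'
      · subst hcn
        calc pvF ('\n' :: cs') t b
            = pvF cs' (pvFlush t b) [] := by rw [pvF]; simp [hc, hw]
          _ = pvLinesB (pvFlush t b) [] (pvSplitNL cs') := ih
          _ = pvLinesB (pvLineToksFrom t b []) [] (pvSplitNL cs') := by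
              rw [pvLineToksFrom_nil]
          _ = pvLinesB t b ([] :: w :: tl) := by rw [hsp]; simp only [pvLinesB]
          _ = pvLinesB t b (pvSplitNL ('\n' :: cs')) := by
              rw [pvSplitNL, hsp]; simp
      · have hcnb : (c == '\n') = false := by simp [hcn]
        have hcb : (c == '#') = false := by simp [hc]
        have hlt : pvLineToksFrom t b (c :: w) = pvLineToksFrom (pvFlush t b) [] w := by
          simp [pvLineToksFrom, hcb, pvStepB, hw]
        calc pvF (c :: cs') t b
            = pvF cs' (pvFlush t b) [] := by rw [pvF]; simp [hc, hw]
          _ = pvLinesB (pvFlush t b) [] (pvSplitNL cs') := ih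
          _ = pvLinesB (pvLineToksFrom (pvFlush t b) [] w) [] tl := by
              rw [hsp]; simp only [pvLinesB]
          _ = pvLinesB (pvLineToksFrom t b (c :: w)) [] tl := by rw [hlt]
          _ = pvLinesB t b ((c :: w) :: tl) := by simp only [pvLinesB]
          _ = pvLinesB t b (pvSplitNL (c :: cs')) := by
              rw [pvSplitNL, hsp]; simp [hcnb]

-- ===== VERDICT (by name: the statement is the Claim_ definition above) =====
theorem tokenize_simple_spec : Claim_equal_tokenize_simple := by
  intro text _
  unfold Spec_tokenize_simple tokenize_simple tokenize_simple_alt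
  have h1 := pvA_eq_pvF text.toList [] []
  have h2 := pvF_eq_pvLinesB text.toList [] []
  have h3 := pvLinesB_eq_foldl (pvSplitNL text.toList) []
  simpa [pvFinish] using h1.trans (h2.trans h3)
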